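-- pv_equiv track=rewrite | github.com/Tim4316/CS-111-Python- | Problem Sets/PS 3/ps3pr2.py | cube_all_rec
-- ===== SOURCE A (Python) =====
-- def cube_all_rec(values):
--     """ return a list conataing the cubes of the
--         numbeers in values
--     """
--     if values == []:
--         return []
--     else:
--         rest_cube_all_rec = cube_all_rec(values[1:])
--         if values[0]:
--             return [values[0] ** 3] + rest_cube_all_rec
--         else:
--             return  rest_cube_all_rec
-- ===== SOURCE B (Python) =====
-- def cube_all_rec(values):
--     """Iterative re-implementation: explicit accumulating loop instead of
--     recursion over list slices."""
--     result = []
--     for x in values: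
--         if x:
--             result.append(x ** 3)
--     return result
-- ===== Notes on version B (the rewrite author's own statement) =====
-- stated objective: faster
-- what changed: Replaces recursion over list slices (each step copies the tail with values[1:] and prepends with list +) by a single explicit loop that appends cubes of truthy elements to an accumulator.
import Mathlib
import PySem

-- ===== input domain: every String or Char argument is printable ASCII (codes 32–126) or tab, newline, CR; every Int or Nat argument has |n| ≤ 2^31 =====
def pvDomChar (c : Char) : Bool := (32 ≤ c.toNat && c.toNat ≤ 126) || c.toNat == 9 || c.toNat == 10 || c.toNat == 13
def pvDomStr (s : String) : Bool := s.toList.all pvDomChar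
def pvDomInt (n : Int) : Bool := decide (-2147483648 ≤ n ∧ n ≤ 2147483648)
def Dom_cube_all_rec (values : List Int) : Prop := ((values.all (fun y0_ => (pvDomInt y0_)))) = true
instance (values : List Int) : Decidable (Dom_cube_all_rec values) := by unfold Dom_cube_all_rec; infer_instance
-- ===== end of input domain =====

-- B replaces A's recursion over list slices by one explicit accumulating loop (asymptotically faster: no per-step tail copy/concatenation).


-- ===== PORT A =====
-- recursion on the tail (values[1:]); 'if values[0]:' is Int truthiness, i.e. ≠ 0
def cube_all_rec (values : List Int) : List Int :=
  match values with
  | [] => []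
  | v :: rest =>
    let rest_cube_all_rec := cube_all_rec rest
    if v ≠ 0 then [v ^ 3] ++ rest_cube_all_rec else rest_cube_all_rec

-- ===== PORT B =====
-- explicit loop: fold over values, appending x ** 3 to the accumulator when x is truthy
def cube_all_rec_alt (values : List Int) : List Int :=
  values.foldl (fun result x => if x ≠ 0 then result ++ [x ^ 3] else result) []

-- ===== PRECONDITION & SPEC =====
def Spec_cube_all_rec (values : List Int) (out : List Int) : Prop := out = cube_all_rec_alt values
instance (values : List Int) (out : List Int) : Decidable (Spec_cube_all_rec values out) := by unfold Spec_cube_all_rec; infer_instance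

-- ===== CLAIM (what is proved, stated in full; the proofs are below) =====
def Claim_equal_cube_all_rec : Prop := ∀ (values : List Int), Dom_cube_all_rec values → Spec_cube_all_rec values (cube_all_rec values)

-- ===== LEMMAS AND PROOFS =====
theorem cube_all_rec_foldl (values : List Int) (acc : List Int) :
    values.foldl (fun result x => if x ≠ 0 then result ++ [x ^ 3] else result) acc
      = acc ++ cube_all_rec values := by
  induction values generalizing acc with
  | nil => simp [cube_all_rec]
  | cons v rest ih =>
    simp only [List.foldl]
    rw [ih]
    by_cases h : v = 0 <;> simp [cube_all_rec, h]

-- ===== VERDICT (by name: the statement is the Claim_ definition above) =====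
theorem cube_all_rec_spec : Claim_equal_cube_all_rec := by
  intro values _
  unfold Spec_cube_all_rec cube_all_rec_alt
  simpa using (cube_all_rec_foldl values []).symm
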